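-- pv_equiv track=rewrite | github.com/blackatze93/cuadrangular | posiciones/views.py | generar_partidos
-- ===== SOURCE A (Python) =====
-- def generar_partidos(equipos):
--     # equipos = ['A','B','C','D']
--     partidos = []
--     for k in equipos:
--         for j in equipos:
--             if j == k:
--                 continue
--
--             z = [k, j]
--             z.sort()
--
--             try:
--                 partidos.index(z)
--             except:
--                 partidos.append(z)
--
--     return partidos
-- ===== SOURCE B (Python) =====
-- def generar_partidos(equipos):
--     # Dedup-first: build unique teams in first-appearance order, then enumerate i<j pairs directly.
--     unicos = []
--     for e in equipos:
--         if e not in unicos: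
--             unicos.append(e)
--     return [sorted([u, v]) for i, u in enumerate(unicos) for v in unicos[i + 1:]]
-- ===== Notes on version B (the rewrite author's own statement) =====
-- stated objective: faster
-- what changed: Deduplicate the team list first (first-appearance order), then emit each unordered pair once by a triangular i<j enumeration, removing A's quadratic stream of ordered pairs each checked by a linear list.index scan.
import Mathlib
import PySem

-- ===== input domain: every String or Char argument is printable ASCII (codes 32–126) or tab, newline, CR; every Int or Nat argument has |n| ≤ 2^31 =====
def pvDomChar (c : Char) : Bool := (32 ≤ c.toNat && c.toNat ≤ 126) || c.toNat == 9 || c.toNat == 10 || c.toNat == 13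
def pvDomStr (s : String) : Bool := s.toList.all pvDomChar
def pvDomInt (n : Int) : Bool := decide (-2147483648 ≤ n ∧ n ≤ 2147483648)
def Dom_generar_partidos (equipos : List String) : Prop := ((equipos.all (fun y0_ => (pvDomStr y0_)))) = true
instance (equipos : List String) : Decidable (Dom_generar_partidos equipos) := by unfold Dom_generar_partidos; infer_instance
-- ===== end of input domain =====

-- B dedups the team list first and then enumerates each unordered pair once (triangular i<j
-- loop), instead of A's all-ordered-pairs stream with a linear list.index dedup scan per pair.

-- sorted two-element list: `z = [k, j]; z.sort()` in A, `sorted([u, v])` in B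
def pvSort2 (a b : String) : List String := PySem.List.sorted [a, b] (fun x => x) false

-- ===== PORT A =====
def generar_partidos (equipos : List String) : List (List String) :=
  equipos.foldl (fun partidos k =>
    equipos.foldl (fun partidos j =>
      if j == k then partidos
      else
        let z := pvSort2 k j
        match PySem.List.index? partidos z with
        | some _ => partidos
        | none => partidos ++ [z]) partidos) []

-- ===== PORT B =====
-- the `for i, u in enumerate(unicos): for v in unicos[i+1:]` comprehension, head-first
def pvTri : List String → List (List String)
  | [] => []
  | u :: rest => rest.map (fun v => pvSort2 u v) ++ pvTri rest

def generar_partidos_alt (equipos : List String) : List (List String) :=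
  let unicos := equipos.foldl (fun us e => if us.contains e then us else us ++ [e]) []
  pvTri unicos

-- ===== PRECONDITION & SPEC =====
def Spec_generar_partidos (equipos : List String) (out : List (List String)) : Prop := out = generar_partidos_alt equipos
instance (equipos : List String) (out : List (List String)) : Decidable (Spec_generar_partidos equipos out) := by unfold Spec_generar_partidos; infer_instance

-- ===== CLAIM (what is proved, stated in full; the proofs are below) =====
def Claim_equal_generar_partidos : Prop := ∀ (equipos : List String), Dom_generar_partidos equipos → Spec_generar_partidos equipos (generar_partidos equipos)

-- ===== LEMMAS AND PROOFS =====

-- "first occurrences of l not already in seen" — the common shape of both programs' dedup loops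
def pvFo {α : Type} [DecidableEq α] (seen : List α) : List α → List α
  | [] => []
  | x :: l => if x ∈ seen then pvFo seen l else x :: pvFo (x :: seen) l

theorem pvFo_congr {α : Type} [DecidableEq α] (l : List α) : ∀ (s t : List α),
    (∀ a, a ∈ s ↔ a ∈ t) → pvFo s l = pvFo t l := by
  induction l with
  | nil => intro s t _; rfl
  | cons x l ih =>
    intro s t h
    by_cases hx : x ∈ s
    · simp [pvFo, hx, (h x).mp hx, ih s t h]
    · have hx' : x ∉ t := fun hc => hx ((h x).mpr hc)
      simp only [pvFo, if_neg hx, if_neg hx']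
      refine congrArg _ (ih _ _ ?_)
      intro a; simp [h a]

theorem pvFo_mem_iff {α : Type} [DecidableEq α] (l : List α) : ∀ (s : List α) (x : α),
    x ∈ pvFo s l ↔ x ∈ l ∧ x ∉ s := by
  induction l with
  | nil => simp [pvFo]
  | cons y l ih =>
    intro s x
    by_cases hy : y ∈ s
    · simp only [pvFo, if_pos hy, ih, List.mem_cons]
      constructor
      · rintro ⟨h1, h2⟩; exact ⟨Or.inr h1, h2⟩
      · rintro ⟨h1 | h1, h2⟩
        · exact absurd hy (h1 ▸ h2)
        · exact ⟨h1, h2⟩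
    · simp only [pvFo, if_neg hy, List.mem_cons, ih]
      constructor
      · rintro (rfl | ⟨h1, h2⟩)
        · exact ⟨Or.inl rfl, hy⟩
        · exact ⟨Or.inr h1, fun hc => h2 (Or.inr hc)⟩
      · rintro ⟨rfl | h1, h2⟩
        · exact Or.inl rfl
        · by_cases hxy : x = y
          · exact Or.inl hxy
          · exact Or.inr ⟨h1, by simp [hxy, h2]⟩

theorem pvFo_nodup {α : Type} [DecidableEq α] (l : List α) : ∀ (s : List α), (pvFo s l).Nodup := by
  induction l with
  | nil => intro s; simp [pvFo]
  | cons x l ih =>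
    intro s
    by_cases hx : x ∈ s
    · simpa [pvFo, hx] using ih s
    · simp only [pvFo, if_neg hx, List.nodup_cons]
      refine ⟨fun hc => ?_, ih _⟩
      exact ((pvFo_mem_iff l _ x).mp hc).2 (List.mem_cons_self)

theorem pvFo_eq_nil {α : Type} [DecidableEq α] (l : List α) (s : List α)
    (h : ∀ x ∈ l, x ∈ s) : pvFo s l = [] := by
  cases hl : pvFo s l with
  | nil => rfl
  | cons y t =>
    have : y ∈ pvFo s l := hl ▸ List.mem_cons_self
    have := (pvFo_mem_iff l s y).mp this
    exact absurd (h y this.1) this.2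

theorem pvFo_seen_cons_of_not_mem {α : Type} [DecidableEq α] (l : List α) : ∀ (s : List α) (x : α),
    x ∉ l → pvFo (x :: s) l = pvFo s l := by
  induction l with
  | nil => intro s x _; rfl
  | cons y l ih =>
    intro s x hx
    have hxy : x ≠ y := fun h => hx (h ▸ List.mem_cons_self)
    have hxl : x ∉ l := fun h => hx (List.mem_cons_of_mem _ h)
    by_cases hy : y ∈ s
    · simp [pvFo, hy, Ne.symm hxy, ih s x hxl]
    · have : y ∉ (x :: s) := by simp [Ne.symm hxy, hy]
      simp only [pvFo, if_neg hy, if_neg this]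
      refine congrArg _ ?_
      rw [pvFo_congr l (y :: x :: s) (x :: y :: s) (by intro a; simp; tauto), ih _ x hxl]

theorem pvFo_append_seen {α : Type} [DecidableEq α] (l : List α) : ∀ (s t : List α),
    pvFo (s ++ t) l = (pvFo s l).filter (fun x => decide (x ∉ t)) := by
  induction l with
  | nil => intro s t; rfl
  | cons x l ih =>
    intro s t
    by_cases hs : x ∈ s
    · simp [pvFo, hs, ih s t]
    · by_cases ht : x ∈ t
      · have : x ∈ s ++ t := List.mem_append.mpr (Or.inr ht)
        simp only [pvFo, if_pos this, if_neg hs, List.filter_cons,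
          decide_eq_true_eq]
        rw [if_neg (by simp [ht])]
        rw [pvFo_congr l (s ++ t) ((x :: s) ++ t) (by
          intro a; simp only [List.mem_append, List.mem_cons]
          constructor
          · tauto
          · rintro ((rfl | h) | h)
            exacts [Or.inr ht, Or.inl h, Or.inr h])]
        exact ih (x :: s) t
      · have : x ∉ s ++ t := by simp [hs, ht]
        simp only [pvFo, if_neg this, if_neg hs, List.filter_cons, decide_eq_true_eq]
        rw [if_pos (by simp [ht])]
        exact congrArg _ (ih (x :: s) t)

theorem pvFo_filter {α : Type} [DecidableEq α] (p : α → Bool) (l : List α) : ∀ (s : List α),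
    pvFo s (l.filter p) = (pvFo s l).filter p := by
  induction l with
  | nil => intro s; rfl
  | cons x l ih =>
    intro s
    by_cases hp : p x
    · by_cases hs : x ∈ s
      · simp [hp, pvFo, hs, ih]
      · simp [hp, pvFo, hs, ih]
    · have hx : x ∉ l.filter p := by
        intro hc; exact hp (List.of_mem_filter hc)
      by_cases hs : x ∈ s
      · simp [hp, pvFo, hs, ih]
      · simp only [Bool.not_eq_true] at hp
        simp only [List.filter_cons, hp, Bool.false_eq_true, pvFo, if_neg hs,
          ite_false]
        rw [← pvFo_seen_cons_of_not_mem (l.filter p) s x hx, ih (x :: s)]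

-- sorted([a,b]) as a two-way if
theorem pvSort2_eq (a b : String) : pvSort2 a b = if a ≤ b then [a, b] else [b, a] := by
  unfold pvSort2
  split_ifs with h
  · apply PySem.List.sorted_eq_self_of_pairwise; simp; simpa using h
  · apply PySem.List.sorted_eq_of_perm_of_pairwise_lt
    · exact List.Perm.swap _ _ _
    · simp; simpa using lt_of_not_ge h

theorem pvSort2_symm (a b : String) : pvSort2 a b = pvSort2 b a := by
  rw [pvSort2_eq, pvSort2_eq]
  rcases le_total a b with h | h
  · by_cases h' : b ≤ a
    · have : a = b := le_antisymm h h'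
      simp [this]
    · simp [h, h']
  · by_cases h' : a ≤ b
    · have : a = b := le_antisymm h' h
      simp [this]
    · simp [h, h']

theorem pvSort2_eq_cases {a b c d : String} (h : pvSort2 a b = pvSort2 c d) :
    (a = c ∧ b = d) ∨ (a = d ∧ b = c) := by
  rw [pvSort2_eq, pvSort2_eq] at h
  split_ifs at h <;> simp at h <;> tauto

theorem pvSort2_inj_right {r a b : String} (h : pvSort2 r a = pvSort2 r b) : a = b := by
  rcases pvSort2_eq_cases h with ⟨h1, h2⟩ | ⟨h1, h2⟩
  · exact h2
  · exact h2.trans h1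

theorem pvFo_map_inj {α β : Type} [DecidableEq α] [DecidableEq β] (f : α → β)
    (hinj : ∀ a b, f a = f b → a = b) (l : List α) : ∀ (s : List α) (acc : List β),
    (∀ j, j ∈ s ↔ f j ∈ acc) → pvFo acc (l.map f) = (pvFo s l).map f := by
  induction l with
  | nil => intro s acc _; rfl
  | cons x l ih =>
    intro s acc h
    by_cases hx : x ∈ s
    · simp only [List.map_cons, pvFo, if_pos ((h x).mp hx), if_pos hx]
      exact ih s acc h
    · have hfx : f x ∉ acc := fun hc => hx ((h x).mpr hc)
      simp only [List.map_cons, pvFo, if_neg hfx, if_neg hx, List.map_cons]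
      refine congrArg _ (ih (x :: s) (f x :: acc) ?_)
      intro j
      simp only [List.mem_cons]
      constructor
      · rintro (rfl | hj)
        · exact Or.inl rfl
        · exact Or.inr ((h j).mp hj)
      · rintro (hj | hj)
        · exact Or.inl (hinj _ _ hj)
        · exact Or.inr ((h j).mpr hj)

-- pairs generated by A's inner loop over F for a fixed k, in stream order
def pvPairs (F : List String) (k : String) : List (List String) :=
  (F.filter (fun j => !(j == k))).map (pvSort2 k)

-- A's outer-loop step, after characterising the inner loop
def pvStep (F : List String) (acc : List (List String)) (k : String) : List (List String) :=
  acc ++ pvFo acc (pvPairs F k)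

theorem mem_pvPairs {F : List String} {k : String} {z : List String} :
    z ∈ pvPairs F k ↔ ∃ j, j ∈ F ∧ j ≠ k ∧ z = pvSort2 k j := by
  simp only [pvPairs, List.mem_map, List.mem_filter, Bool.not_eq_eq_eq_not, Bool.not_true,
    beq_eq_false_iff_ne, ne_eq]
  constructor
  · rintro ⟨j, ⟨hj, hne⟩, rfl⟩; exact ⟨j, hj, hne, rfl⟩
  · rintro ⟨j, hj, hne, rfl⟩; exact ⟨j, ⟨hj, hne⟩, rfl⟩

-- A's inner loop = append the not-yet-seen pairs, in first-occurrence order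
theorem innerA (F : List String) (k : String) : ∀ (F' : List String) (acc : List (List String)),
    List.foldl (fun partidos j =>
      if j == k then partidos
      else
        let z := pvSort2 k j
        match PySem.List.index? partidos z with
        | some _ => partidos
        | none => partidos ++ [z]) acc F'
    = acc ++ pvFo acc ((F'.filter (fun j => !(j == k))).map (pvSort2 k)) := by
  intro F'
  induction F' with
  | nil => intro acc; simp [pvFo]
  | cons j F' ih =>
    intro acc
    by_cases hjk : (j == k) = true
    · have hf : (!(j == k)) = false := by simp [hjk]
      simp only [List.foldl_cons, if_pos hjk, List.filter_cons, hf, Bool.false_eq_true,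
        if_false]
      exact ih acc
    · have hf : (!(j == k)) = true := by simp at hjk ⊢; exact hjk
      simp only [List.foldl_cons, if_neg hjk, List.filter_cons, hf, if_true, List.map_cons]
      by_cases hz : pvSort2 k j ∈ acc
      · obtain ⟨n, hn⟩ := Option.isSome_iff_exists.mp ((PySem.List.index?_isSome_iff acc (pvSort2 k j)).mpr hz)
        simp only [hn]
        rw [ih acc]
        simp [pvFo, hz]
      · have hn : PySem.List.index? acc (pvSort2 k j) = none :=
          (PySem.List.index?_eq_none_iff acc (pvSort2 k j)).mpr hz
        simp only [hn]
        rw [ih (acc ++ [pvSort2 k j])]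
        simp only [pvFo, if_neg hz]
        rw [pvFo_congr _ (acc ++ [pvSort2 k j]) (pvSort2 k j :: acc) (by intro a; simp; tauto)]
        simp

-- Done F d acc: every pair involving d is already present
def pvDone (F : List String) (d : String) (acc : List (List String)) : Prop :=
  ∀ j ∈ F, j ≠ d → pvSort2 d j ∈ acc

theorem pvDone_after (F : List String) (k : String) (acc : List (List String)) :
    pvDone F k (pvStep F acc k) := by
  intro j hj hne
  have hz : pvSort2 k j ∈ pvPairs F k := mem_pvPairs.mpr ⟨j, hj, hne, rfl⟩
  by_cases hacc : pvSort2 k j ∈ acc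
  · exact List.mem_append.mpr (Or.inl hacc)
  · exact List.mem_append.mpr (Or.inr ((pvFo_mem_iff _ _ _).mpr ⟨hz, hacc⟩))

-- duplicate outer iterations are no-ops: fold over ks = fold over its first occurrences
theorem pvGo_dedup (F : List String) : ∀ (ks seen : List String) (acc : List (List String)),
    (∀ d ∈ seen, pvDone F d acc) →
    List.foldl (pvStep F) acc ks = List.foldl (pvStep F) acc (pvFo seen ks) := by
  intro ks
  induction ks with
  | nil => intro seen acc _; rfl
  | cons k ks ih =>
    intro seen acc h
    by_cases hk : k ∈ seen
    · have hstep : pvStep F acc k = acc := by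
        unfold pvStep
        rw [pvFo_eq_nil]
        · simp
        · intro z hz
          obtain ⟨j, hj, hne, rfl⟩ := mem_pvPairs.mp hz
          exact h k hk j hj hne
      simp only [List.foldl_cons, hstep, pvFo, if_pos hk]
      exact ih seen acc h
    · simp only [List.foldl_cons, pvFo, if_neg hk]
      refine ih (k :: seen) (pvStep F acc k) ?_
      intro d hd
      rcases List.mem_cons.mp hd with rfl | hd
      · exact pvDone_after F d acc
      · intro j hj hne
        exact List.mem_append.mpr (Or.inl (h d hd j hj hne))

-- the triangular phase: from an accumulator holding exactly the pairs of the done teams,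
-- folding over the remaining unique teams appends pvTri of them
theorem pvGo_tri (F : List String) : ∀ (rs ds : List String) (acc : List (List String)),
    pvFo [] F = ds ++ rs →
    (∀ z, z ∈ acc ↔ ∃ d ∈ ds, ∃ j ∈ pvFo [] F, j ≠ d ∧ z = pvSort2 d j) →
    List.foldl (pvStep F) acc rs = acc ++ pvTri rs := by
  intro rs
  induction rs with
  | nil => intro ds acc _ _; simp [pvTri]
  | cons r rs ih =>
    intro ds acc hus hinv
    have hnd : (pvFo [] F).Nodup := pvFo_nodup F []
    rw [hus] at hnd
    have hrds : r ∉ ds := by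
      intro hc
      exact (List.disjoint_of_nodup_append hnd) hc List.mem_cons_self
    have hrrs : r ∉ rs := by
      have := (hnd.of_append_right)
      exact (List.nodup_cons.mp this).1
    have hdisj : ∀ x ∈ rs, x ∉ ds := by
      intro x hx hc
      exact (List.disjoint_of_nodup_append hnd) hc (List.mem_cons_of_mem _ hx)
    have hrus : r ∈ pvFo [] F := by rw [hus]; simp
    have hiff : ∀ j, j ∈ ds ↔ pvSort2 r j ∈ acc := by
      intro j
      constructor
      · intro hj
        refine (hinv _).mpr ⟨j, hj, r, hrus, fun hc => hrds (hc ▸ hj), pvSort2_symm r j⟩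
      · intro hj
        obtain ⟨d, hd, j', _, _, heq⟩ := (hinv _).mp hj
        rcases pvSort2_eq_cases heq with ⟨h1, _⟩ | ⟨_, h2⟩
        · exact absurd (h1 ▸ hd) hrds
        · exact h2 ▸ hd
    have hmap : pvFo acc (pvPairs F r)
        = (pvFo ds (F.filter (fun j => !(j == r)))).map (pvSort2 r) :=
      pvFo_map_inj (pvSort2 r) (fun _ _ h => pvSort2_inj_right h) _ ds acc hiff
    have hfo : pvFo ds (F.filter (fun j => !(j == r))) = rs := by
      have h1 := pvFo_append_seen (F.filter (fun j => !(j == r))) [] ds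
      simp only [List.nil_append] at h1
      rw [h1, pvFo_filter, hus]
      have e1 : ds.filter (fun j => !(j == r)) = ds :=
        List.filter_eq_self.mpr (fun x hx => by
          simp only [Bool.not_eq_eq_eq_not, Bool.not_true, beq_eq_false_iff_ne, ne_eq]
          exact fun hc => hrds (hc ▸ hx))
      have e3 : rs.filter (fun j => !(j == r)) = rs :=
        List.filter_eq_self.mpr (fun x hx => by
          simp only [Bool.not_eq_eq_eq_not, Bool.not_true, beq_eq_false_iff_ne, ne_eq]
          exact fun hc => hrrs (hc ▸ hx))
      have e2 : ds.filter (fun x => decide (x ∉ ds)) = [] :=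
        List.filter_eq_nil_iff.mpr (fun x hx => by simp [hx])
      have e4 : rs.filter (fun x => decide (x ∉ ds)) = rs :=
        List.filter_eq_self.mpr (fun x hx => by simp [hdisj x hx])
      rw [List.filter_append, e1, List.filter_cons]
      simp only [beq_self_eq_true, Bool.not_true, Bool.false_eq_true, if_false]
      rw [e3, List.filter_append, e2, e4, List.nil_append]
    have hstep : pvStep F acc r = acc ++ rs.map (pvSort2 r) := by
      unfold pvStep
      rw [hmap, hfo]
    have hinv' : ∀ z, z ∈ acc ++ rs.map (pvSort2 r) ↔
        ∃ d ∈ ds ++ [r], ∃ j ∈ pvFo [] F, j ≠ d ∧ z = pvSort2 d j := by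
      intro z
      constructor
      · intro hz
        rcases List.mem_append.mp hz with hz | hz
        · obtain ⟨d, hd, j, hj, hne, rfl⟩ := (hinv _).mp hz
          exact ⟨d, List.mem_append.mpr (Or.inl hd), j, hj, hne, rfl⟩
        · obtain ⟨v, hv, rfl⟩ := List.mem_map.mp hz
          refine ⟨r, by simp, v, by rw [hus]; simp [hv], fun hc => hrrs (hc ▸ hv), rfl⟩
      · rintro ⟨d, hd, j, hj, hne, rfl⟩
        rcases List.mem_append.mp hd with hd | hd
        · exact List.mem_append.mpr (Or.inl ((hinv _).mpr ⟨d, hd, j, hj, hne, rfl⟩))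
        · have hdr : d = r := by simpa using hd
          subst hdr
          rw [hus] at hj
          rcases List.mem_append.mp hj with hj | hj
          · refine List.mem_append.mpr (Or.inl ((hinv _).mpr
              ⟨j, hj, d, hrus, fun hc => hrds (hc ▸ hj), pvSort2_symm d j⟩))
          · rcases List.mem_cons.mp hj with rfl | hj
            · exact absurd rfl hne
            · exact List.mem_append.mpr (Or.inr (List.mem_map.mpr ⟨j, hj, rfl⟩))
    rw [List.foldl_cons, hstep,
      ih (ds ++ [r]) (acc ++ rs.map (pvSort2 r)) (by rw [hus]; simp) hinv']
    simp [pvTri, List.append_assoc]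

theorem unicos_eq (equipos : List String) :
    equipos.foldl (fun us e => if us.contains e then us else us ++ [e]) [] = pvFo [] equipos := by
  have gen : ∀ (l acc : List String),
      l.foldl (fun us e => if us.contains e then us else us ++ [e]) acc = acc ++ pvFo acc l := by
    intro l
    induction l with
    | nil => intro acc; simp [pvFo]
    | cons x l ih =>
      intro acc
      by_cases hx : x ∈ acc
      · have hc : acc.contains x = true := by simpa using hx
        simp only [List.foldl_cons, if_pos hc, pvFo, if_pos hx]
        exact ih acc
      · have hc : ¬ acc.contains x = true := by simpa using hx
        simp only [List.foldl_cons, if_neg hc, pvFo, if_neg hx]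
        rw [ih (acc ++ [x]),
          pvFo_congr l (acc ++ [x]) (x :: acc) (by intro a; simp; tauto)]
        simp
  simpa using gen equipos []

theorem generar_eq_go (equipos : List String) :
    generar_partidos equipos = List.foldl (pvStep equipos) [] equipos := by
  unfold generar_partidos
  have hfun : (fun (partidos : List (List String)) (k : String) =>
      List.foldl (fun partidos j =>
        if j == k then partidos
        else
          let z := pvSort2 k j
          match PySem.List.index? partidos z with
          | some _ => partidos
          | none => partidos ++ [z]) partidos equipos) = pvStep equipos := by
    funext acc k
    rw [innerA equipos k equipos acc]
    rfl
  rw [hfun]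

-- ===== VERDICT (by name: the statement is the Claim_ definition above) =====
theorem generar_partidos_spec : Claim_equal_generar_partidos := by
  intro equipos _
  unfold Spec_generar_partidos generar_partidos_alt
  rw [generar_eq_go, unicos_eq]
  rw [pvGo_dedup equipos equipos [] [] (by simp)]
  rw [pvGo_tri equipos (pvFo [] equipos) [] [] (by simp) (by simp)]
  simp
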